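-- pv_equiv track=rewrite | github.com/Yehia-Fahmy/interview_training | composer/01_code_challenge/easy/solution_01.py | process_numbers_optimized_v2
-- ===== SOURCE A (Python) =====
-- def process_numbers_optimized_v2(numbers):
--     """
--     Single-pass solution that combines all operations.
--     Most memory-efficient approach.
--     """
--     seen = set()
--     result = []
--     for num in numbers:
--         # Deduplicate and check if seen
--         if num in seen:
--             continue
--         seen.add(num)
--
--         # Filter evens and square
--         if num % 2 == 0:
--             result.append(num * num)
--
--     return result
-- ===== SOURCE B (Python) =====
-- def process_numbers_optimized_v2(numbers):
--     """Worklist sieve: take the front element, emit its square if even,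
--     then purge every copy of it from the remaining worklist. No seen-set."""
--     result = []
--     rest = list(numbers)
--     while rest:
--         x = rest[0]
--         if x % 2 == 0:
--             result.append(x * x)
--         rest = [y for y in rest[1:] if y != x]
--     return result
-- ===== Notes on version B (the rewrite author's own statement) =====
-- stated objective: alternative
-- what changed: Replaces A's single pass with a seen-set by a sieve over a shrinking worklist: repeatedly pop the front element, emit its square if even, and purge all its remaining duplicates by filtering the worklist, so no auxiliary membership structure exists at all.
import Mathlib
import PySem

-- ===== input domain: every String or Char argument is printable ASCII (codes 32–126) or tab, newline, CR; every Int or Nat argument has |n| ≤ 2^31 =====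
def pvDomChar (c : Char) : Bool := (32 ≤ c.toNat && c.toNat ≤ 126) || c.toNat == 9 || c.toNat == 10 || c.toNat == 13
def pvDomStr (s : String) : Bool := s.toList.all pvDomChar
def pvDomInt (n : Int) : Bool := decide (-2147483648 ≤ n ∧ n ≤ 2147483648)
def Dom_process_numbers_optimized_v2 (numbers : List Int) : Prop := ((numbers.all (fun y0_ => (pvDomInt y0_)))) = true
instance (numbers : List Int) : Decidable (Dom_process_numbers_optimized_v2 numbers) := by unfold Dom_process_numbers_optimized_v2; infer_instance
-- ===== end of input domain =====

-- B replaces A's seen-set pass by a worklist sieve (pop the front element, purge its duplicates); alternative decomposition, same results.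
-- ===== PORT A =====
-- the 'for num in numbers' loop with its 'seen' set and 'result' accumulator
def pnLoopA : List Int → PySem.Set Int → List Int → List Int
  | [], _, result => result
  | num :: rest, seen, result =>
    if PySem.Set.contains seen num then
      pnLoopA rest seen result
    else if PySem.Int.mod num 2 == 0 then
      pnLoopA rest (PySem.Set.add seen num) (result ++ [num * num])
    else
      pnLoopA rest (PySem.Set.add seen num) result

def process_numbers_optimized_v2 (numbers : List Int) : List Int :=
  pnLoopA numbers PySem.Set.empty []

-- ===== PORT B =====
-- the 'while rest' loop: x = rest[0]; maybe emit x*x; rest = [y for y in rest[1:] if y != x]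
def pnLoopB : List Int → List Int → List Int
  | [], result => result
  | x :: t, result =>
    pnLoopB (t.filter (fun y => y != x))
      (if PySem.Int.mod x 2 == 0 then result ++ [x * x] else result)
termination_by rest _ => rest.length
decreasing_by
  simp only [List.length_cons, List.length_unattach]
  exact Nat.lt_succ_of_le (le_trans (List.length_filter_le _ _) (by simp))

def process_numbers_optimized_v2_alt (numbers : List Int) : List Int :=
  pnLoopB numbers []

-- ===== PRECONDITION & SPEC =====
def Spec_process_numbers_optimized_v2 (numbers : List Int) (out : List Int) : Prop := out = process_numbers_optimized_v2_alt numbers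
instance (numbers : List Int) (out : List Int) : Decidable (Spec_process_numbers_optimized_v2 numbers out) := by unfold Spec_process_numbers_optimized_v2; infer_instance

-- ===== CLAIM (what is proved, stated in full; the proofs are below) =====
def Claim_equal_process_numbers_optimized_v2 : Prop := ∀ (numbers : List Int), Dom_process_numbers_optimized_v2 numbers → Spec_process_numbers_optimized_v2 numbers (process_numbers_optimized_v2 numbers)

-- ===== LEMMAS AND PROOFS =====

-- A's loop on l with memory 'seen' equals B's sieve started on l with seen's elements pre-filtered out.
theorem pnLoopA_eq_pnLoopB (l : List Int) (seen : PySem.Set Int) (acc : List Int) :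
    pnLoopA l seen acc = pnLoopB (l.filter (fun y => !(PySem.Set.contains seen y))) acc := by
  induction l generalizing seen acc with
  | nil => simp [pnLoopA, pnLoopB]
  | cons x rest ih =>
    by_cases h : x ∈ seen
    · simp [pnLoopA, PySem.Set.contains, h, List.filter, ih]
    · have hfil : ((rest.filter (fun y => !(PySem.Set.contains seen y))).filter
          (fun y => y != x)) =
          rest.filter (fun y => !(PySem.Set.contains (PySem.Set.add seen x) y)) := by
        rw [List.filter_filter]
        apply List.filter_congr
        intro y _
        by_cases hy : y = x <;> by_cases hs : y ∈ seen <;>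
          simp [PySem.Set.add, PySem.Set.contains, h, hy, hs, bne]
      have hcons : (x :: rest).filter (fun y => !(PySem.Set.contains seen y)) =
          x :: rest.filter (fun y => !(PySem.Set.contains seen y)) := by
        simp [PySem.Set.contains, h]
      rw [hcons]
      simp only [pnLoopB]
      rw [hfil, ← ih]
      simp [pnLoopA, PySem.Set.add, PySem.Set.contains, h]
      split_ifs <;> rfl

-- ===== VERDICT (by name: the statement is the Claim_ definition above) =====
theorem process_numbers_optimized_v2_spec : Claim_equal_process_numbers_optimized_v2 := by
  intro numbers _
  unfold Spec_process_numbers_optimized_v2 process_numbers_optimized_v2 process_numbers_optimized_v2_alt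
  rw [pnLoopA_eq_pnLoopB]
  simp [PySem.Set.empty, PySem.Set.contains]
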